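-- pv_equiv track=rewrite | github.com/Kunal-agrawall/DSA-training | DSA/2 _ Python DS/listo.py | sort_tuples_by_sum
-- ===== SOURCE A (Python) =====
-- def sort_tuples_by_sum(a):
--     n = len(a)
--     f = False
--     for i in range(n):
--         for j in range(n-i-1):
--             if a[j][0]+a[j][1] > a[j+1][0]+a[j+1][1]:
--                 temp = a[j]
--                 a[j] = a[j+1]
--                 a[j+1] = temp
--                 f = True
--         if not f:
--             return a
--     return a
-- ===== SOURCE B (Python) =====
-- def sort_tuples_by_sum(a):
--     # stable sort by element sum, written back in place so the caller's list
--     # object is mutated and returned, exactly as the bubble-sort original does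
--     a[:] = sorted(a, key=lambda t: t[0] + t[1])
--     return a
-- ===== Notes on version B (the rewrite author's own statement) =====
-- stated objective: faster
-- what changed: replaces the hand-written bubble sort (with its early-exit flag) by Python's built-in stable sort with key=element sum, written back in place with slice assignment
import Mathlib
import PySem

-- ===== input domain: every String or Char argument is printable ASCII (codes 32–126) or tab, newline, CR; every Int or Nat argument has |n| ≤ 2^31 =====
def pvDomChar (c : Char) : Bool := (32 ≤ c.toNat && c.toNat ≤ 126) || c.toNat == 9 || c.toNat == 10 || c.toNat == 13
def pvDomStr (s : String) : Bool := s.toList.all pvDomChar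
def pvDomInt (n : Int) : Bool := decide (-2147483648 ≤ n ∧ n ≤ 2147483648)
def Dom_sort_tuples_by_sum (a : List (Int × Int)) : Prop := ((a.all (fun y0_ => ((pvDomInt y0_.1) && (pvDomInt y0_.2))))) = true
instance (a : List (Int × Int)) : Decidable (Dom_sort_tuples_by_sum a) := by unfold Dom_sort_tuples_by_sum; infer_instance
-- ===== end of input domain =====

-- B replaces A's bubble sort by the built-in stable sort (key = element sum); both mutate the
-- argument in place in Python — the equivalence proved here is about the return value.


-- ===== PORT A =====
-- bubble sort with the (never-reset) early-exit flag, inner loop over j in range(n-i-1)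
def sort_tuples_by_sum (a : List (Int × Int)) : List (Int × Int) :=
  let n : Int := (a.length : Int)
  (List.foldl
    (fun (s : List (Int × Int) × Bool × Bool) (i : Int) =>
      if s.2.2 then s
      else
        let inner := List.foldl
          (fun (t : List (Int × Int) × Bool) (j : Int) =>
            let x := PySem.List.pyGetD t.1 j (0, 0)
            let y := PySem.List.pyGetD t.1 (j + 1) (0, 0)
            if x.1 + x.2 > y.1 + y.2 then
              ((t.1.set j.toNat y).set (j + 1).toNat x, true)
            else t)
          (s.1, s.2.1) (PySem.List.pyRange 0 (n - i - 1))
        if !inner.2 then (inner.1, inner.2, true) else (inner.1, inner.2, false))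
    (a, false, false) (PySem.List.pyRange 0 n)).1

-- ===== PORT B =====
-- Source B: a[:] = sorted(a, key=lambda t: t[0] + t[1]); return a
def sort_tuples_by_sum_alt (a : List (Int × Int)) : List (Int × Int) :=
  PySem.List.sorted a (fun t => t.1 + t.2) false

-- ===== PRECONDITION & SPEC =====
def Spec_sort_tuples_by_sum (a : List (Int × Int)) (out : List (Int × Int)) : Prop := out = sort_tuples_by_sum_alt a
instance (a : List (Int × Int)) (out : List (Int × Int)) : Decidable (Spec_sort_tuples_by_sum a out) := by unfold Spec_sort_tuples_by_sum; infer_instance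

-- ===== CLAIM (what is proved, stated in full; the proofs are below) =====
def Claim_equal_sort_tuples_by_sum : Prop := ∀ (a : List (Int × Int)), Dom_sort_tuples_by_sum a → Spec_sort_tuples_by_sum a (sort_tuples_by_sum a)

-- ===== LEMMAS AND PROOFS =====

-- the sort key
def bkey (t : Int × Int) : Int := t.1 + t.2

-- the inner loop body of port A, as a named function
def innerStep (t : List (Int × Int) × Bool) (j : Int) : List (Int × Int) × Bool :=
  let x := PySem.List.pyGetD t.1 j (0, 0)
  let y := PySem.List.pyGetD t.1 (j + 1) (0, 0)
  if x.1 + x.2 > y.1 + y.2 then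
    ((t.1.set j.toNat y).set (j + 1).toNat x, true)
  else t

-- the outer loop body of port A, as a named function
def outerStep (n : Int) (s : List (Int × Int) × Bool × Bool) (i : Int) : List (Int × Int) × Bool × Bool :=
  if s.2.2 then s
  else
    let inner := List.foldl innerStep (s.1, s.2.1) (PySem.List.pyRange 0 (n - i - 1))
    if !inner.2 then (inner.1, inner.2, true) else (inner.1, inner.2, false)

theorem portA_eq (a : List (Int × Int)) :
    sort_tuples_by_sum a =
      (List.foldl (outerStep (a.length : Int)) (a, false, false)
        (PySem.List.pyRange 0 (a.length : Int))).1 := rfl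

-- one bubble pass with fuel m (m comparisons at positions 0..m-1), returning (list, swapped?)
def passF : Nat → List (Int × Int) → List (Int × Int) × Bool
  | _, [] => ([], false)
  | 0, l => (l, false)
  | _+1, [x] => ([x], false)
  | m+1, x :: y :: t =>
      if y.1 + y.2 < x.1 + x.2 then
        ((y :: (passF m (x :: t)).1), true)
      else
        ((x :: (passF m (y :: t)).1), (passF m (y :: t)).2)

theorem passF_zero (l : List (Int × Int)) : passF 0 l = (l, false) := by
  cases l <;> rfl

theorem passF_perm (m : Nat) (l : List (Int × Int)) : (passF m l).1.Perm l := by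
  induction m generalizing l with
  | zero => simp [passF_zero]
  | succ m ih =>
    match l with
    | [] => simp [passF]
    | [x] => simp [passF]
    | x :: y :: t =>
      rw [passF]
      split
      · exact ((ih (x :: t)).cons y).trans (List.Perm.swap x y t)
      · exact (ih (y :: t)).cons x

theorem passF_length (m : Nat) (l : List (Int × Int)) : (passF m l).1.length = l.length :=
  (passF_perm m l).length_eq

theorem passF_filter (m : Nat) (l : List (Int × Int)) (k : Int) :
    (passF m l).1.filter (fun z => bkey z == k) = l.filter (fun z => bkey z == k) := by
  induction m generalizing l with
  | zero => simp [passF_zero]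
  | succ m ih =>
    match l with
    | [] => simp [passF]
    | [x] => simp [passF]
    | x :: y :: t =>
      rw [passF]
      split
      · rename_i h
        by_cases hx : bkey x == k
        · have hy : ¬ (bkey y == k) := by
            simp only [beq_iff_eq] at hx ⊢
            simp only [bkey] at *; omega
          simp [hx, hy, ih (x :: t)]
        · by_cases hy : bkey y == k <;>
            simp_all [ih (x :: t)]
      · have := ih (y :: t)
        by_cases hx : bkey x == k <;> simp_all [List.filter_cons]

theorem passF_noswap (m : Nat) (l : List (Int × Int)) (hlen : l.length ≤ m + 1)
    (hf : (passF m l).2 = false) :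
    (passF m l).1 = l ∧ l.Pairwise (fun a b => bkey a ≤ bkey b) := by
  induction m generalizing l with
  | zero =>
    match l, hlen with
    | [], _ => simp [passF]
    | [x], _ => simp [passF]
  | succ m ih =>
    match l with
    | [] => simp [passF]
    | [x] => simp [passF]
    | x :: y :: t =>
      rw [passF] at hf ⊢
      split at hf
      · simp at hf
      · rename_i h
        simp only at hf
        obtain ⟨h1, h2⟩ := ih (y :: t) (by simpa using Nat.le_of_succ_le_succ hlen) hf
        refine ⟨by simp [h, h1], ?_⟩
        refine List.Pairwise.cons ?_ h2
        intro z hz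
        rcases List.mem_cons.mp hz with rfl | hz
        · simp [bkey]; omega
        · have := (List.pairwise_cons.mp h2).1 z hz
          simp only [bkey] at *; omega

theorem passF_max (m : Nat) (l : List (Int × Int)) (hne : l ≠ []) (hlen : l.length ≤ m + 1) :
    ∃ ys mx, (passF m l).1 = ys ++ [mx] ∧ (∀ x ∈ l, bkey x ≤ bkey mx) := by
  induction m generalizing l with
  | zero =>
    match l, hlen with
    | [x], _ => exact ⟨[], x, by simp [passF], by simp⟩
  | succ m ih =>
    match l with
    | [x] => exact ⟨[], x, by simp [passF], by simp⟩
    | x :: y :: t =>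
      have hlt : (x :: t).length ≤ m + 1 := by simp at hlen ⊢; omega
      have hlt2 : (y :: t).length ≤ m + 1 := by simp at hlen ⊢; omega
      rw [passF]
      split
      · rename_i h
        obtain ⟨ys, mx, he, hm⟩ := ih (x :: t) (by simp) hlt
        refine ⟨y :: ys, mx, by simp [he], ?_⟩
        intro z hz
        have hxm := hm x (by simp)
        rcases List.mem_cons.mp hz with rfl | hz
        · exact hxm
        rcases List.mem_cons.mp hz with rfl | hz
        · simp only [bkey] at *; omega
        · exact hm z (by simp [hz])
      · rename_i h
        obtain ⟨ys, mx, he, hm⟩ := ih (y :: t) (by simp) hlt2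
        refine ⟨x :: ys, mx, by simp [he], ?_⟩
        intro z hz
        have hym := hm y (by simp)
        rcases List.mem_cons.mp hz with rfl | hz
        · simp only [bkey] at *; omega
        rcases List.mem_cons.mp hz with rfl | hz
        · exact hym
        · exact hm z (by simp [hz])

theorem passF_append (m : Nat) (pre suf : List (Int × Int)) (hlen : pre.length = m + 1) :
    passF m (pre ++ suf) = ((passF m pre).1 ++ suf, (passF m pre).2) := by
  induction m generalizing pre with
  | zero =>
    match pre, hlen with
    | [x], _ =>
      cases suf with
      | nil => simp [passF_zero]
      | cons s ss => simp [passF_zero]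
  | succ m ih =>
    match pre, hlen with
    | x :: y :: t, hlen =>
      have hl : (x :: t).length = m + 1 := by simpa using hlen
      simp only [List.cons_append]
      rw [passF, passF]
      split
      · have h1 := ih (x :: t) hl
        simp only [List.cons_append] at h1
        simp [h1]
      · have hl2 : (y :: t).length = m + 1 := by simpa using hlen
        have h1 := ih (y :: t) hl2
        simp only [List.cons_append] at h1
        simp [h1]

-- list indexing on the tail, for nonnegative indices
theorem pyGetD_cons_succ (x : Int × Int) (l : List (Int × Int)) (d : Int × Int) (j : Int)
    (hj : 0 ≤ j) :
    PySem.List.pyGetD (x :: l) (j + 1) d = PySem.List.pyGetD l j d := by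
  simp only [PySem.List.pyGetD, PySem.List.pyGet?, PySem.List.pyIdx?]
  by_cases h : j < (l.length : Int)
  · simp only [List.length_cons]
    rw [if_pos (by omega), if_pos (by push_cast; omega), if_pos hj, if_pos h]
    have : (j + 1).toNat = j.toNat + 1 := by omega
    simp [this]
  · simp only [List.length_cons]
    rw [if_pos (by omega), if_neg (by push_cast; omega), if_pos hj, if_neg h]
    simp

theorem pyGetD_cons_zero (x : Int × Int) (l : List (Int × Int)) (d : Int × Int) :
    PySem.List.pyGetD (x :: l) 0 d = x := by
  simp [PySem.List.pyGetD, PySem.List.pyGet?, PySem.List.pyIdx?]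

-- one inner-loop step at a shifted index acts on the tail
theorem innerStep_shift (a : Int) (ha : 0 ≤ a) (z : Int × Int) (l : List (Int × Int)) (f : Bool) :
    innerStep (z :: l, f) (a + 1) = (z :: (innerStep (l, f) a).1, (innerStep (l, f) a).2) := by
  simp only [innerStep, pyGetD_cons_succ _ _ _ _ ha,
    pyGetD_cons_succ _ _ _ _ (by omega : (0:Int) ≤ a + 1)]
  have h1 : (a + 1).toNat = a.toNat + 1 := by omega
  have h2 : (a + 1 + 1).toNat = a.toNat + 1 + 1 := by omega
  split <;> simp [h1, h2]

-- the inner fold over a shifted range acts on the tail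
theorem innerFold_shift (c : Nat) : ∀ (a : Int), 0 ≤ a → ∀ (z : Int × Int)
    (l : List (Int × Int)) (f : Bool),
    List.foldl innerStep (z :: l, f) (PySem.List.pyRange (a + 1) (a + 1 + c)) =
      (z :: (List.foldl innerStep (l, f) (PySem.List.pyRange a (a + c))).1,
        (List.foldl innerStep (l, f) (PySem.List.pyRange a (a + c))).2) := by
  induction c with
  | zero =>
    intro a ha z l f
    simp [PySem.List.pyRange]
  | succ c ih =>
    intro a ha z l f
    rw [PySem.List.pyRange_one_cons (by omega : a + 1 < a + 1 + (c + 1 : Nat)),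
        PySem.List.pyRange_one_cons (by omega : a < a + (c + 1 : Nat))]
    simp only [List.foldl_cons]
    rw [innerStep_shift a ha]
    have he1 : a + 1 + ((c + 1 : Nat) : Int) = (a + 1) + 1 + (c : Int) := by push_cast; ring
    have he2 : a + ((c + 1 : Nat) : Int) = (a + 1) + (c : Int) := by push_cast; ring
    rw [he1, he2]
    obtain ⟨l', f'⟩ := innerStep (l, f) a
    exact ih (a + 1) (by omega) z l' f'

-- the inner fold IS one bubble pass
theorem innerFold_eq_passF (m : Nat) : ∀ (l : List (Int × Int)) (f : Bool),
    m + 1 ≤ l.length →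
    List.foldl innerStep (l, f) (PySem.List.pyRange 0 (m : Int)) =
      ((passF m l).1, f || (passF m l).2) := by
  induction m with
  | zero => intro l f h; simp [PySem.List.pyRange, passF_zero]
  | succ m ih =>
    intro l f h
    match l, h with
    | x :: y :: t, h =>
      rw [PySem.List.pyRange_one_cons (by push_cast; omega : (0:Int) < ((m + 1 : Nat) : Int))]
      simp only [List.foldl_cons]
      have hstep : innerStep (x :: y :: t, f) 0 =
          if y.1 + y.2 < x.1 + x.2 then (y :: x :: t, true) else (x :: y :: t, f) := by
        have hg1 : PySem.List.pyGetD (x :: y :: t) 1 (0, 0) = y := by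
          rw [show (1:Int) = 0 + 1 by ring, pyGetD_cons_succ _ _ _ _ le_rfl, pyGetD_cons_zero]
        simp only [innerStep, pyGetD_cons_zero, zero_add, hg1]
        split <;> simp [List.set]
      rw [hstep]
      have hr : ((m + 1 : Nat) : Int) = 0 + 1 + (m : Int) := by push_cast; ring
      have hr2 : (0:Int) + (m : Int) = (m : Int) := by ring
      by_cases hc : y.1 + y.2 < x.1 + x.2
      · rw [if_pos hc, hr, innerFold_shift m 0 (le_refl 0) y (x :: t) true, hr2,
           ih (x :: t) true (by simp at h ⊢; omega), passF, if_pos hc]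
        simp
      · rw [if_neg hc, hr, innerFold_shift m 0 (le_refl 0) x (y :: t) f, hr2,
           ih (y :: t) f (by simp at h ⊢; omega), passF, if_neg hc]

-- once the early-return flag is set, the outer loop does nothing
theorem outer_done (n : Int) (js : List Int) (l : List (Int × Int)) (f : Bool) :
    List.foldl (outerStep n) (l, f, true) js = (l, f, true) := by
  induction js with
  | nil => rfl
  | cons j js ih => simpa [outerStep] using ih

-- the remaining passes, as a plain fold of passF with shrinking fuel
def runPasses (n : Int) (l : List (Int × Int)) (js : List Int) : List (Int × Int) :=
  js.foldl (fun acc j => (passF (n - j - 1).toNat acc).1) l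

-- once f is true, the outer fold runs every remaining pass
theorem outer_run (n : Int) (js : List Int) : ∀ (l : List (Int × Int)),
    n = (l.length : Int) → (∀ j ∈ js, 0 ≤ j ∧ j < n) →
    List.foldl (outerStep n) (l, true, false) js = (runPasses n l js, true, false) := by
  induction js with
  | nil => intro l _ _; rfl
  | cons j js ih =>
    intro l hn hj
    obtain ⟨hj0, hjn⟩ := hj j (by simp)
    have hcast : n - j - 1 = (((n - j - 1).toNat : Nat) : Int) := by omega
    have hfuel : (n - j - 1).toNat + 1 ≤ l.length := by omega
    simp only [List.foldl_cons, runPasses]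
    have hstep : outerStep n (l, true, false) j =
        ((passF (n - j - 1).toNat l).1, true, false) := by
      simp only [outerStep]
      rw [if_neg (by simp)]
      rw [hcast, innerFold_eq_passF _ l true hfuel]
      simp
    rw [hstep]
    have := ih (passF (n - j - 1).toNat l).1
      (by rw [passF_length]; exact hn) (fun j hjm => hj j (by simp [hjm]))
    simpa [runPasses] using this

theorem runPasses_filter (n : Int) (js : List Int) : ∀ (l : List (Int × Int)) (k : Int),
    (runPasses n l js).filter (fun z => bkey z == k) = l.filter (fun z => bkey z == k) := by
  induction js with
  | nil => intro l k; rfl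
  | cons j js ih =>
    intro l k
    simp only [runPasses, List.foldl_cons]
    have := ih (passF (n - j - 1).toNat l).1 k
    simp only [runPasses] at this
    rw [this, passF_filter]

theorem passes_sorted (nn : Nat) (d : Nat) : ∀ (i : Nat) (pre suf : List (Int × Int)),
    i + d = nn → pre.length = d →
    suf.Pairwise (fun a b => bkey a ≤ bkey b) →
    (∀ p ∈ pre, ∀ s ∈ suf, bkey p ≤ bkey s) →
    (runPasses (nn : Int) (pre ++ suf) (PySem.List.pyRange (i : Int) (nn : Int))).Pairwise
      (fun a b => bkey a ≤ bkey b) := by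
  induction d with
  | zero =>
    intro i pre suf hi hpre hsuf hcross
    have : pre = [] := List.length_eq_zero_iff.mp hpre
    subst this
    have hnn : (i : Int) = (nn : Int) := by omega
    rw [hnn]
    have hrange : PySem.List.pyRange (nn : Int) (nn : Int) = [] := by
      simp [PySem.List.pyRange]
    rw [hrange]
    simpa [runPasses] using hsuf
  | succ d ih =>
    intro i pre suf hi hpre hsuf hcross
    have hlt : (i : Int) < (nn : Int) := by omega
    rw [PySem.List.pyRange_one_cons hlt]
    simp only [runPasses, List.foldl_cons]
    have hfuel : ((nn : Int) - i - 1).toNat = d := by omega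
    rw [hfuel]
    have hd : pre.length = d + 1 := hpre
    rw [passF_append d pre suf hd]
    have hne : pre ≠ [] := by
      intro h; rw [h] at hd; simp at hd
    obtain ⟨ys, mx, he, hm⟩ := passF_max d pre hne (by omega)
    have hyslen : ys.length = d := by
      have := passF_length d pre
      rw [he] at this; simp at this; omega
    have hmem : ∀ z ∈ ys ++ [mx], z ∈ pre := fun z hz =>
      ((passF_perm d pre).mem_iff).mp (he ▸ hz)
    have hmx : mx ∈ pre := hmem mx (by simp)
    rw [he, List.append_assoc]
    have step := ih (i + 1) ys (mx :: suf) (by omega) hyslen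
      (by
        refine List.Pairwise.cons ?_ hsuf
        intro s hs
        exact hcross mx hmx s hs)
      (by
        intro p hp s hs
        have hppre : p ∈ pre := hmem p (by simp [hp])
        rcases List.mem_cons.mp hs with rfl | hs
        · exact hm p hppre
        · exact hcross p hppre s hs)
    have hcasts : ((i + 1 : Nat) : Int) = (i : Int) + 1 := by push_cast; ring
    rw [hcasts] at step
    simpa [runPasses, List.cons_append] using step

-- insertBy into a key-sorted list keeps the key-classes, appending x at the end of its class
theorem insertBy_filter (k : Int) (x : Int × Int) (acc : List (Int × Int))
    (hs : acc.Pairwise (fun a b => bkey a ≤ bkey b)) :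
    (PySem.List.insertBy (fun a b => decide (bkey a < bkey b)) x acc).filter
        (fun z => bkey z == k) =
      acc.filter (fun z => bkey z == k) ++ (if bkey x == k then [x] else []) := by
  induction acc with
  | nil => simp [PySem.List.insertBy, List.filter_cons]
  | cons y ys ih =>
    rw [PySem.List.insertBy]
    split
    · rename_i h
      simp only [decide_eq_true_eq] at h
      by_cases hx : bkey x == k
      · have hclass : (y :: ys).filter (fun z => bkey z == k) = [] := by
          rw [List.filter_eq_nil_iff]
          intro z hz
          have hyz : bkey y ≤ bkey z := by
            rcases List.mem_cons.mp hz with rfl | hz2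
            · exact le_refl _
            · exact (List.pairwise_cons.mp hs).1 z hz2
          simp only [beq_iff_eq] at hx ⊢
          simp only [bkey] at *
          omega
        rw [List.filter_cons_of_pos (by simpa using hx), hclass]
        simp [hx]
      · rw [List.filter_cons_of_neg (by simpa using hx)]
        simp [hx]
    · rename_i h
      have htl := ih (List.Pairwise.sublist (List.sublist_cons_self y ys) hs)
      by_cases hy : bkey y == k
      · rw [List.filter_cons_of_pos (by simpa using hy),
            List.filter_cons_of_pos (by simpa using hy), htl]
        simp
      · rw [List.filter_cons_of_neg (by simpa using hy),
            List.filter_cons_of_neg (by simpa using hy), htl]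

-- the built-in stable sort keeps the key-classes
theorem sorted_filter (xs : List (Int × Int)) (k : Int) :
    (PySem.List.sorted xs bkey false).filter (fun z => bkey z == k) =
      xs.filter (fun z => bkey z == k) := by
  induction xs using List.reverseRecOn with
  | nil => rfl
  | append_singleton l x ih =>
    rw [PySem.List.sorted_eq_foldl_insertBy, List.foldl_append, List.foldl_cons, List.foldl_nil,
        ← PySem.List.sorted_eq_foldl_insertBy]
    rw [insertBy_filter k x _ (PySem.List.sorted_pairwise l bkey), ih]
    by_cases hx : bkey x == k
    · simp [hx, List.filter_append]
    · simp [hx, List.filter_append]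

-- a stable sort is unique: two key-sorted lists with identical key-classes are equal
theorem stable_unique (ys : List (Int × Int)) : ∀ (zs : List (Int × Int)),
    ys.Pairwise (fun a b => bkey a ≤ bkey b) → zs.Pairwise (fun a b => bkey a ≤ bkey b) →
    (∀ k : Int, ys.filter (fun z => bkey z == k) = zs.filter (fun z => bkey z == k)) →
    ys = zs := by
  induction ys with
  | nil =>
    intro zs _ _ hk
    cases zs with
    | nil => rfl
    | cons z u =>
      have := hk (bkey z)
      rw [List.filter_cons_of_pos (by simp)] at this
      simp at this
  | cons y t ih =>
    intro zs hys hzs hk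
    cases zs with
    | nil =>
      have := hk (bkey y)
      rw [List.filter_cons_of_pos (by simp)] at this
      simp at this
    | cons z u =>
      have hzy : z ∈ y :: t := by
        have h1 := hk (bkey z)
        have h2 : z ∈ List.filter (fun w => bkey w == bkey z) (y :: t) := by
          rw [h1]
          exact List.mem_filter.mpr ⟨by simp, by simp⟩
        exact (List.mem_filter.mp h2).1
      have hyz : y ∈ z :: u := by
        have h1 := hk (bkey y)
        have h2 : y ∈ List.filter (fun w => bkey w == bkey y) (z :: u) := by
          rw [← h1]
          exact List.mem_filter.mpr ⟨by simp, by simp⟩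
        exact (List.mem_filter.mp h2).1
      have hle1 : bkey y ≤ bkey z := by
        rcases List.mem_cons.mp hzy with h | h
        · simp [h]
        · exact (List.pairwise_cons.mp hys).1 z h
      have hle2 : bkey z ≤ bkey y := by
        rcases List.mem_cons.mp hyz with h | h
        · simp [h]
        · exact (List.pairwise_cons.mp hzs).1 y h
      have hkey : bkey y = bkey z := le_antisymm hle1 hle2
      have hmain := hk (bkey y)
      rw [List.filter_cons_of_pos (by simp), List.filter_cons_of_pos (by simp [hkey])] at hmain
      obtain ⟨hyeqz, hmtail⟩ := List.cons_eq_cons.mp hmain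
      have htails : ∀ k : Int,
          t.filter (fun w => bkey w == k) = u.filter (fun w => bkey w == k) := by
        intro k
        by_cases hkk : k = bkey y
        · subst hkk
          exact hmtail
        · have h3 := hk k
          rw [List.filter_cons_of_neg (by simp; exact fun hh => hkk hh.symm),
              List.filter_cons_of_neg (by
                simp
                intro hh
                exact hkk (by rw [← hh, hkey]))] at h3
          exact h3
      rw [hyeqz, ih u (List.Pairwise.sublist (List.sublist_cons_self y t) hys)
        (List.Pairwise.sublist (List.sublist_cons_self z u) hzs) htails]

-- ===== VERDICT (by name: the statement is the Claim_ definition above) =====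
theorem sort_tuples_by_sum_spec : Claim_equal_sort_tuples_by_sum := by
  intro a _
  show sort_tuples_by_sum a = sort_tuples_by_sum_alt a
  have halt : sort_tuples_by_sum_alt a = PySem.List.sorted a bkey false := rfl
  rw [portA_eq, halt]
  cases a with
  | nil => rfl
  | cons a0 at_ =>
    set a := a0 :: at_ with ha
    have hne : a ≠ [] := by simp [ha]
    have hlen : 1 ≤ a.length := by simp [ha]
    rw [PySem.List.pyRange_one_cons (by omega : (0:Int) < (a.length : Int))]
    simp only [List.foldl_cons]
    have hcast : (a.length : Int) - 0 - 1 = (((a.length - 1 : Nat) : Nat) : Int) := by omega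
    have hstep0 : outerStep (a.length : Int) (a, false, false) 0 =
        (if (passF (a.length - 1) a).2 then ((passF (a.length - 1) a).1, true, false)
         else ((passF (a.length - 1) a).1, false, true)) := by
      simp only [outerStep]
      rw [if_neg (by simp)]
      rw [hcast, innerFold_eq_passF _ a false (by omega)]
      cases hsw : (passF (a.length - 1) a).2 <;> simp
    rw [hstep0]
    cases hsw : (passF (a.length - 1) a).2
    · -- no swap in the first pass: early return, list already sorted
      rw [if_neg (by simp)]
      obtain ⟨heq, hpw⟩ := passF_noswap (a.length - 1) a (by omega) hsw
      rw [heq, outer_done]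
      simp only
      exact (PySem.List.sorted_eq_self_of_pairwise a bkey hpw).symm
    · -- a swap happened: the flag stays true, all n passes run
      rw [if_pos (by simp)]
      set l1 := (passF (a.length - 1) a).1 with hl1
      have hlen1 : l1.length = a.length := passF_length _ _
      rw [outer_run (a.length : Int) _ l1 (by rw [hlen1])
        (fun j hj => by
          have := PySem.List.mem_pyRange_one.mp hj
          omega)]
      simp only
      -- the result of all passes is key-sorted and has the key-classes of a
      obtain ⟨ys, mx, he, hm⟩ := passF_max (a.length - 1) a hne (by omega)
      have he' : l1 = ys ++ [mx] := hl1.trans he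
      have hyslen : ys.length = a.length - 1 := by
        have h2 := hlen1
        rw [he'] at h2
        simp at h2
        omega
      have hsorted : (runPasses (a.length : Int) l1
          (PySem.List.pyRange 1 (a.length : Int))).Pairwise (fun a b => bkey a ≤ bkey b) := by
        have := passes_sorted a.length (a.length - 1) 1 ys [mx] (by omega) hyslen
          (by simp) (by
            intro p hp s hs
            rcases List.mem_singleton.mp hs with rfl
            have hppre : p ∈ a := ((passF_perm (a.length - 1) a).mem_iff).mp
              (by rw [he]; simp [hp])
            exact hm p hppre)
        rw [← he'] at this
        have h1 : ((1 : Nat) : Int) = (1 : Int) := by norm_num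
        rwa [h1] at this
      have hfilters : ∀ k : Int,
          (runPasses (a.length : Int) l1 (PySem.List.pyRange 1 (a.length : Int))).filter
              (fun z => bkey z == k) =
            (PySem.List.sorted a bkey false).filter (fun z => bkey z == k) := by
        intro k
        rw [runPasses_filter, sorted_filter, hl1, passF_filter]
      exact stable_unique _ _ hsorted (PySem.List.sorted_pairwise a bkey) hfilters
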